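-- pv_equiv track=rewrite | github.com/casp3rus/100DaysOfAlgo | 083GenerateDocument/generateDocument.py | generateDocument
-- ===== SOURCE A (Python) =====
-- def generateDocument(characters, document):
--     alreadyCounted = set()
--
--     for character in document:
--         if character in alreadyCounted:
--             continue
--
--         documentFrequency = countCharacterFrequency(character, document)
--         characterFrequency = countCharacterFrequency(character, characters)
--
--         if documentFrequency > characterFrequency:
--             return False
--
--         alreadyCounted.add(character)
--
--     return True
--
-- def countCharacterFrequency(character, target):
--     frequency = 0
--     for char in target:
--         if char == character:
--             frequency += 1
--
--     return frequency
-- ===== SOURCE B (Python) =====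
-- def generateDocument(characters, document):
--     budget = {}
--     for ch in characters:
--         budget[ch] = budget.get(ch, 0) + 1
--     for ch in document:
--         remaining = budget.get(ch, 0)
--         if remaining <= 0:
--             return False
--         budget[ch] = remaining - 1
--     return True
-- ===== Notes on version B (the rewrite author's own statement) =====
-- stated objective: alternative
-- what changed: Replaces A's seen-set plus per-distinct-character rescans of both strings with a frequency table built once from characters and consumed in a single decrementing pass over document.
import Mathlib
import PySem

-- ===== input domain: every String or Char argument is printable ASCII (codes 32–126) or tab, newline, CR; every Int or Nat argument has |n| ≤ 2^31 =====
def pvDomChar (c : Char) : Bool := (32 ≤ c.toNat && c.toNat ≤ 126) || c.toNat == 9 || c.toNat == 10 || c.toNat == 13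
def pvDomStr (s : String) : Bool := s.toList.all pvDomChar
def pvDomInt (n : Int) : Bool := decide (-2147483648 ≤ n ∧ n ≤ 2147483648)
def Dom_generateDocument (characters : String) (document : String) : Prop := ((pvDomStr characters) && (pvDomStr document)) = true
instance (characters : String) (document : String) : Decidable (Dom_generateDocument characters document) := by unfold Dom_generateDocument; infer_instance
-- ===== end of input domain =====

-- B replaces A's seen-set with per-distinct-character rescans by one frequency table built from characters and consumed in a single decrementing pass over document (alternative algorithm).

-- ===== PORT A =====
def countCharacterFrequency (character : Char) (target : String) : Int :=
  target.toList.foldl (fun frequency ch => if ch == character then frequency + 1 else frequency) 0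

def generateDocumentGo (characters document : String) : List Char → PySem.Set Char → Bool
  | [], _ => true
  | character :: rest, alreadyCounted =>
    if PySem.Set.contains alreadyCounted character then
      generateDocumentGo characters document rest alreadyCounted
    else
      let documentFrequency := countCharacterFrequency character document
      let characterFrequency := countCharacterFrequency character characters
      if documentFrequency > characterFrequency then false
      else generateDocumentGo characters document rest (PySem.Set.add alreadyCounted character)

def generateDocument (characters : String) (document : String) : Bool :=
  generateDocumentGo characters document document.toList PySem.Set.empty

-- ===== PORT B =====
def generateDocumentAltGo (budget : PySem.Dict Char Int) : List Char → Bool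
  | [] => true
  | ch :: rest =>
    let remaining := budget.getD ch 0
    if remaining ≤ 0 then false
    else generateDocumentAltGo (budget.insert ch (remaining - 1)) rest

def generateDocument_alt (characters : String) (document : String) : Bool :=
  let budget := characters.toList.foldl (fun d ch => d.insert ch (d.getD ch 0 + 1)) PySem.Dict.empty
  generateDocumentAltGo budget document.toList

-- ===== PRECONDITION & SPEC =====
def Spec_generateDocument (characters : String) (document : String) (out : Bool) : Prop := out = generateDocument_alt characters document
instance (characters : String) (document : String) (out : Bool) : Decidable (Spec_generateDocument characters document out) := by unfold Spec_generateDocument; infer_instance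

-- ===== CLAIM (what is proved, stated in full; the proofs are below) =====
def Claim_equal_generateDocument : Prop := ∀ (characters : String) (document : String), Dom_generateDocument characters document → Spec_generateDocument characters document (generateDocument characters document)

-- ===== LEMMAS AND PROOFS =====

lemma cf_eq_count (c : Char) (s : String) :
    countCharacterFrequency c s = (s.toList.count c : Int) := by
  unfold countCharacterFrequency
  simpa using PySem.List.foldl_beq_add_one (l := s.toList) (v := c) (a := 0)

-- A's loop, with the invariant that every already-counted character passed its check.
lemma goA_iff (characters document : String) :
    ∀ (rest : List Char) (seen : PySem.Set Char),
      (∀ c ∈ seen, document.toList.count c ≤ characters.toList.count c) →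
      (generateDocumentGo characters document rest seen = true ↔
        ∀ c ∈ rest, document.toList.count c ≤ characters.toList.count c) := by
  intro rest
  induction rest with
  | nil => intro seen _; simp [generateDocumentGo]
  | cons c rest ih =>
    intro seen hseen
    by_cases hc : c ∈ seen
    · have hcc : PySem.Set.contains seen c = true := (PySem.Set.contains_iff seen c).mpr hc
      rw [generateDocumentGo, if_pos hcc, ih seen hseen]
      constructor
      · intro h x hx
        rcases List.mem_cons.mp hx with rfl | hx
        · exact hseen _ hc
        · exact h x hx
      · intro h x hx; exact h x (List.mem_cons_of_mem _ hx)
    · have hcc : PySem.Set.contains seen c = false := by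
        rw [Bool.eq_false_iff]
        intro h
        exact hc ((PySem.Set.contains_iff seen c).mp h)
      rw [generateDocumentGo, if_neg (by simp [hc])]
      simp only [cf_eq_count]
      by_cases hgt : (document.toList.count c : Int) > (characters.toList.count c : Int)
      · rw [if_pos hgt]
        constructor
        · intro h; exact absurd h (by simp)
        · intro h
          exact absurd (by exact_mod_cast h c (List.mem_cons_self)) (by omega)
      · rw [if_neg hgt]
        have hle : document.toList.count c ≤ characters.toList.count c := by
          exact_mod_cast not_lt.mp hgt
        have hseen' : ∀ x ∈ PySem.Set.add seen c,
            document.toList.count x ≤ characters.toList.count x := by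
          intro x hx
          rcases (PySem.Set.mem_add seen c x).mp hx with hx | rfl
          · exact hseen _ hx
          · exact hle
        rw [ih _ hseen']
        constructor
        · intro h x hx
          rcases List.mem_cons.mp hx with rfl | hx
          · exact hle
          · exact h x hx
        · intro h x hx; exact h x (List.mem_cons_of_mem _ hx)

-- B's loop: with a nonnegative budget, it succeeds iff every character's total
-- count in the remaining suffix fits within its remaining budget.
lemma goB_iff :
    ∀ (rest : List Char) (budget : PySem.Dict Char Int),
      (∀ c, 0 ≤ budget.getD c 0) →
      (generateDocumentAltGo budget rest = true ↔
        ∀ c, (rest.count c : Int) ≤ budget.getD c 0) := by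
  intro rest
  induction rest with
  | nil =>
    intro budget hb
    simp only [generateDocumentAltGo, List.count_nil, Int.natCast_zero]
    exact ⟨fun _ => hb, fun _ => trivial⟩
  | cons ch rest ih =>
    intro budget hb
    rw [generateDocumentAltGo]
    by_cases hz : budget.getD ch 0 ≤ 0
    · rw [if_pos hz]
      constructor
      · intro h; exact absurd h (by simp)
      · intro h
        have := h ch
        simp only [List.count_cons_self] at this
        have : ((rest.count ch : Int) + 1) ≤ budget.getD ch 0 := by exact_mod_cast this
        have h0 : (0 : Int) ≤ (rest.count ch : Int) := Int.natCast_nonneg _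
        omega
    · rw [if_neg hz]
      rw [not_le] at hz
      have hb' : ∀ c, 0 ≤ (budget.insert ch (budget.getD ch 0 - 1)).getD c 0 := by
        intro c
        by_cases hcc : c = ch
        · subst hcc; simp [PySem.Dict.getD_insert_self]; omega
        · rw [PySem.Dict.getD_insert_of_ne _ _ _ (by simpa using hcc)]
          exact hb c
      rw [ih _ hb']
      constructor
      · intro h c
        by_cases hcc : c = ch
        · subst hcc
          have := h c
          rw [PySem.Dict.getD_insert_self] at this
          simp only [List.count_cons_self]
          push_cast
          omega
        · have := h c
          rw [PySem.Dict.getD_insert_of_ne _ _ _ (by simpa using hcc)] at this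
          rw [List.count_cons_of_ne (Ne.symm hcc)]
          exact this
      · intro h c
        by_cases hcc : c = ch
        · subst hcc
          have := h c
          rw [PySem.Dict.getD_insert_self]
          simp only [List.count_cons_self] at this
          push_cast at this ⊢
          omega
        · rw [PySem.Dict.getD_insert_of_ne _ _ _ (by simpa using hcc)]
          have := h c
          rw [List.count_cons_of_ne (Ne.symm hcc)] at this
          exact this

lemma budget_getD (characters : String) (c : Char) :
    (characters.toList.foldl (fun d ch => d.insert ch (d.getD ch 0 + 1)) PySem.Dict.empty).getD c 0
      = (characters.toList.count c : Int) := by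
  rw [PySem.Dict.getD_foldl_insert_add_one]
  simp [PySem.Dict.getD, PySem.Dict.get?, PySem.Dict.empty]

-- ===== VERDICT (by name: the statement is the Claim_ definition above) =====
theorem generateDocument_spec : Claim_equal_generateDocument := by
  intro characters document _
  unfold Spec_generateDocument generateDocument generateDocument_alt
  have hA := goA_iff characters document document.toList PySem.Set.empty (by
    intro c hc; simp [PySem.Set.empty] at hc)
  have hB := goB_iff document.toList
      (characters.toList.foldl (fun d ch => d.insert ch (d.getD ch 0 + 1)) PySem.Dict.empty)
      (by intro c; rw [budget_getD]; exact Int.natCast_nonneg _)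
  have hiff : generateDocumentGo characters document document.toList PySem.Set.empty = true ↔
      generateDocumentAltGo
        (characters.toList.foldl (fun d ch => d.insert ch (d.getD ch 0 + 1)) PySem.Dict.empty)
        document.toList = true := by
    rw [hA, hB]
    constructor
    · intro h c
      by_cases hc : c ∈ document.toList
      · rw [budget_getD]; exact_mod_cast h c hc
      · rw [budget_getD]
        simp [List.count_eq_zero_of_not_mem hc]
    · intro h c hc
      have := h c
      rw [budget_getD] at this
      exact_mod_cast this
  clear hA hB
  cases h1 : generateDocumentGo characters document document.toList PySem.Set.empty <;>
  cases h2 : generateDocumentAltGo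
      (characters.toList.foldl (fun d ch => d.insert ch (d.getD ch 0 + 1)) PySem.Dict.empty)
      document.toList <;> simp_all
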